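-- pv_equiv track=rewrite | github.com/MrBrantCode/unitest_baseline | mut_generate/mist_train_taco/taco_11971/solution.py | calculate_walking_distances
-- ===== SOURCE A (Python) =====
-- import heapq
-- from collections import defaultdict
--
-- def calculate_walking_distances(N, Q, roadworks, start_times):
--     INF = 1 << 31
--     event = []
--
--     # Create events for roadworks
--     for s, t, x in roadworks:
--         event.append((s - x, -1, x))
--         event.append((t - x, 0, x))
--
--     # Create events for people
--     for i, d in enumerate(start_times):
--         event.append((d, 1, i))
--
--     # Initialize answer list
--     ans = [-1] * Q
--
--     # Sort events
--     event.sort()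
--
--     # Priority queue and counters
--     q = []
--     push = defaultdict(int)
--     pop = defaultdict(int)
--
--     # Process events
--     for t, typ, x in event:
--         if typ == -1:
--             heapq.heappush(q, x)
--             push[x] += 1
--         elif typ == 0:
--             pop[x] += 1
--         else:
--             p = -1
--             if q:
--                 p = q[0]
--             while p != -1 and push[p] - pop[p] == 0:
--                 heapq.heappop(q)
--                 if q:
--                     p = q[0]
--                 else:
--                     p = -1
--                     break
--             ans[x] = p
--
--     return ans
-- ===== SOURCE B (Python) =====
-- def calculate_walking_distances(N, Q, roadworks, start_times):
--     # Person starting at d meets roadwork (s, t, x) iff s - x <= d < t - x;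
--     # the answer is the minimum such x, or -1 if none.
--     ans = [-1] * Q
--     for i, d in enumerate(start_times):
--         best = None
--         for s, t, x in roadworks:
--             if s - x <= d < t - x and (best is None or x < best):
--                 best = x
--         ans[i] = -1 if best is None else best
--     return ans
-- ===== Notes on version B (the rewrite author's own statement) =====
-- stated objective: simpler
-- what changed: A builds a sorted event list and sweeps it with a min-heap plus lazy-deletion push/pop counters; B drops the events, the sort, the heap and the counters entirely and, for each person, directly scans the roadworks once taking the minimum x with s-x <= d < t-x.
-- outside the precondition, e.g. on calculate_walking_distances(1, 1, [(0, 5, 2), (9, 0, 2)], [4]): A returns [2], B returns [-1]; on calculate_walking_distances(1, 1, [(0, 1, -1), (0, 9, 3)], [3]): A returns [-1], B returns [3]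
import Mathlib
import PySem

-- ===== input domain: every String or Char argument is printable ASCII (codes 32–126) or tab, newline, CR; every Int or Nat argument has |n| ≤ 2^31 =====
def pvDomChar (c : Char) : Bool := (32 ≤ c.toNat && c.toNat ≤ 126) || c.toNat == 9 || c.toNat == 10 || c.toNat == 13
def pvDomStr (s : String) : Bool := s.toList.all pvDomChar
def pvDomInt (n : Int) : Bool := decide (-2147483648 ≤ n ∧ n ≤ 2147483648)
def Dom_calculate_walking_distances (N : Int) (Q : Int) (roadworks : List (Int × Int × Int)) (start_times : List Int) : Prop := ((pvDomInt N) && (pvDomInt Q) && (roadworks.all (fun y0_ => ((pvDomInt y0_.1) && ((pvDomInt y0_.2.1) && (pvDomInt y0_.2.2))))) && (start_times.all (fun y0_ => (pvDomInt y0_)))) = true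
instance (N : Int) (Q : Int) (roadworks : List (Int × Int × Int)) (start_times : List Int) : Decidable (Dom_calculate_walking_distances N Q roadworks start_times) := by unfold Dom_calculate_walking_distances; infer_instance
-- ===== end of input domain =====

-- B replaces A's sorted event sweep (heap + lazy-deletion push/pop counters) by a direct
-- per-person minimum scan over the roadworks; objective: simpler (no speed claim).

-- ===== PORT A =====
-- heapq is modeled by the sorted list of the heap's contents: q[0] = head = minimum,
-- heappush = ordered insert, heappop = drop the head.  This is exact for A, which observes
-- the heap only through q[0] and heappop.
def pvHeapPush : List Int → Int → List Int
  | [], x => [x]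
  | h :: t, x => if x ≤ h then x :: h :: t else h :: pvHeapPush t x

-- the inner 'p = q[0] if q else -1; while p != -1 and push[p] - pop[p] == 0: heappop(q); …'
def pvCleanup (pu po : PySem.Dict Int Int) : List Int → List Int × Int
  | [] => ([], -1)
  | h :: t =>
    if h = -1 then (h :: t, -1)
    else if pu.getD h 0 - po.getD h 0 = 0 then pvCleanup pu po t
    else (h :: t, h)

-- Python sorts the (t, typ, x) tuples lexicographically: compare via the lexicographic order
def pvEvKey (e : Int × Int × Int) : Lex (Int × Lex (Int × Int)) := toLex (e.1, toLex (e.2.1, e.2.2))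

-- 'for t, typ, x in event: …'  (defaultdict(int) counters: push[x] += 1 is insert (get+1))
def pvLoopA : List (Int × Int × Int) → List Int → PySem.Dict Int Int → PySem.Dict Int Int → List Int → List Int
  | [], _q, _pu, _po, ans => ans
  | (_t, typ, x) :: rest, q, pu, po, ans =>
    if typ = -1 then pvLoopA rest (pvHeapPush q x) (pu.insert x (pu.getD x 0 + 1)) po ans
    else if typ = 0 then pvLoopA rest q pu (po.insert x (po.getD x 0 + 1)) ans
    else
      let r := pvCleanup pu po q
      pvLoopA rest r.1 pu po (PySem.List.pySetD ans x r.2)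

-- (A's local INF = 1 << 31 is never used by A and is not ported)
def calculate_walking_distances (N : Int) (Q : Int) (roadworks : List (Int × Int × Int)) (start_times : List Int) : List Int :=
  let event1 := roadworks.foldl (fun acc e => acc ++ [(e.1 - e.2.2, -1, e.2.2), (e.2.1 - e.2.2, 0, e.2.2)]) []
  let event2 := (PySem.List.enumerate start_times).foldl (fun acc p => acc ++ [(p.2, 1, p.1)]) event1
  let ans := List.replicate Q.toNat (-1)      -- [-1] * Q
  let event := PySem.List.sorted event2 pvEvKey
  pvLoopA event [] PySem.Dict.empty PySem.Dict.empty ans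

-- ===== PORT B =====
-- best = None; for s, t, x in roadworks: if s - x <= d < t - x: best = x if best is None or x < best
def pvBest (roadworks : List (Int × Int × Int)) (d : Int) : Option Int :=
  roadworks.foldl
    (fun best e =>
      if e.1 - e.2.2 ≤ d ∧ d < e.2.1 - e.2.2 then
        match best with
        | none => some e.2.2
        | some b => if e.2.2 < b then some e.2.2 else some b
      else best)
    none

def calculate_walking_distances_alt (N : Int) (Q : Int) (roadworks : List (Int × Int × Int)) (start_times : List Int) : List Int :=
  let ans := List.replicate Q.toNat (-1)      -- [-1] * Q
  (PySem.List.enumerate start_times).foldl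
    (fun a p => PySem.List.pySetD a p.1 (match pvBest roadworks p.2 with | none => -1 | some b => b)) ans

-- ===== PRECONDITION & SPEC =====
-- Pre_ excludes (a) inputs with more start_times than Q, on which A raises IndexError, and,
-- as defensible-corner artefacts of A's implementation, (b) inputs where a reversed roadwork
-- (t < s) shares its value x with a different roadwork (A's per-value lazy-deletion counters
-- conflate them) and (c) roadworks with value x = -1 (A uses -1 as its heap sentinel); on both
-- (b) and (c) A's answer is an accident of the heap state.
def Pre_calculate_walking_distances (N : Int) (Q : Int) (roadworks : List (Int × Int × Int)) (start_times : List Int) : Prop :=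
  (∀ e ∈ roadworks, e.2.2 ≠ -1) ∧
  (∀ e ∈ roadworks, e.2.1 < e.1 → ∀ e' ∈ roadworks, e'.2.2 = e.2.2 → e' = e) ∧
  (start_times.length : Int) ≤ Q
instance (N : Int) (Q : Int) (roadworks : List (Int × Int × Int)) (start_times : List Int) : Decidable (Pre_calculate_walking_distances N Q roadworks start_times) := by unfold Pre_calculate_walking_distances; infer_instance

def pvWitness_calculate_walking_distances : Int × Int × (List (Int × Int × Int)) × List Int :=
  (5, 2, [(0, 5, 2), (1, 3, 4)], [1, 3])

def Spec_calculate_walking_distances (N : Int) (Q : Int) (roadworks : List (Int × Int × Int)) (start_times : List Int) (out : List Int) : Prop := out = calculate_walking_distances_alt N Q roadworks start_times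
instance (N : Int) (Q : Int) (roadworks : List (Int × Int × Int)) (start_times : List Int) (out : List Int) : Decidable (Spec_calculate_walking_distances N Q roadworks start_times out) := by unfold Spec_calculate_walking_distances; infer_instance

-- ===== CLAIM (what is proved, stated in full; the proofs are below) =====
def Claim_equal_calculate_walking_distances : Prop := ∀ (N : Int) (Q : Int) (roadworks : List (Int × Int × Int)) (start_times : List Int), Dom_calculate_walking_distances N Q roadworks start_times → Pre_calculate_walking_distances N Q roadworks start_times → Spec_calculate_walking_distances N Q roadworks start_times (calculate_walking_distances N Q roadworks start_times)

-- ===== LEMMAS AND PROOFS =====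

-- the unsorted event list A builds
def pvRawEvents (roadworks : List (Int × Int × Int)) (start_times : List Int) : List (Int × Int × Int) :=
  roadworks.flatMap (fun e => [(e.1 - e.2.2, -1, e.2.2), (e.2.1 - e.2.2, 0, e.2.2)])
    ++ (PySem.List.enumerate start_times).map (fun p => (p.2, 1, p.1))

-- start/end event counts of value v in a processed prefix P
def pvCntS (P : List (Int × Int × Int)) (v : Int) : Nat := P.countP (fun e => e.2.1 == -1 && e.2.2 == v)
def pvCntE (P : List (Int × Int × Int)) (v : Int) : Nat := P.countP (fun e => e.2.1 == 0 && e.2.2 == v)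
-- number of roadworks of value v covering position d
def pvCov (rw : List (Int × Int × Int)) (v d : Int) : Nat :=
  rw.countP (fun r => r.2.2 == v && (decide (r.1 - v ≤ d) && decide (d < r.2.1 - v)))

def pvNet (P : List (Int × Int × Int)) (v : Int) : Int := (pvCntS P v : Int) - (pvCntE P v : Int)

def pvInv (P : List (Int × Int × Int)) (q : List Int) (pu po : PySem.Dict Int Int) : Prop :=
  (∀ v, pu.getD v 0 = (pvCntS P v : Int)) ∧ (∀ v, po.getD v 0 = (pvCntE P v : Int)) ∧
  q.Pairwise (· ≤ ·) ∧
  (∀ v, pvNet P v ≤ (q.count v : Int)) ∧ (∀ v, ((q.count v : Int)) ≤ (pvCntS P v : Int))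

-- what A's person step does, expressed with B's value
def pvUpd (rw : List (Int × Int × Int)) (a : List Int) (e : Int × Int × Int) : List Int :=
  if e.2.1 = 1 then PySem.List.pySetD a e.2.2 (match pvBest rw e.1 with | none => -1 | some b => b) else a

theorem pvCount_heapPush (q : List Int) (x v : Int) :
    (pvHeapPush q x).count v = q.count v + (if v = x then 1 else 0) := by
  induction q with
  | nil => by_cases h : v = x <;> simp [pvHeapPush, List.count_cons, h] <;> omega
  | cons a t ih =>
    simp only [pvHeapPush]
    split
    · simp only [List.count_cons]
      by_cases h : v = x <;> by_cases h2 : v = a <;> by_cases h3 : x = a <;> simp [h, h2, h3] <;> omega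
    · simp only [List.count_cons, ih]
      by_cases h : v = x <;> by_cases h2 : v = a <;> by_cases h3 : x = a <;> simp [h, h2, h3] <;> omega

theorem pvMem_heapPush (q : List Int) (x v : Int) : v ∈ pvHeapPush q x ↔ v = x ∨ v ∈ q := by
  have := pvCount_heapPush q x v
  constructor
  · intro h
    have h1 : 0 < (pvHeapPush q x).count v := List.count_pos_iff.2 h
    by_cases hv : v = x
    · exact Or.inl hv
    · right; rw [this, if_neg hv] at h1; exact List.count_pos_iff.1 (by omega)
  · intro h
    apply List.count_pos_iff.1
    rw [this]
    rcases h with h | h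
    · simp [h]
    · have := List.count_pos_iff.2 h; omega

theorem pvPairwise_heapPush (q : List Int) (x : Int) (h : q.Pairwise (· ≤ ·)) :
    (pvHeapPush q x).Pairwise (· ≤ ·) := by
  induction q with
  | nil => simp [pvHeapPush]
  | cons a t ih =>
    rw [List.pairwise_cons] at h
    simp only [pvHeapPush]
    split
    · rename_i hxa
      refine List.pairwise_cons.2 ⟨?_, List.pairwise_cons.2 ⟨h.1, h.2⟩⟩
      intro b hb
      rcases List.mem_cons.1 hb with rfl | hb
      · exact hxa
      · exact le_trans hxa (h.1 b hb)
    · rename_i hxa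
      refine List.pairwise_cons.2 ⟨?_, ih h.2⟩
      intro b hb
      rcases (pvMem_heapPush t x b).1 hb with rfl | hb
      · omega
      · exact h.1 b hb

theorem pvCountP_split {α : Type} (l : List α) (p q : α → Bool) (h : ∀ a ∈ l, q a = true → p a = true) :
    l.countP p = l.countP q + l.countP (fun a => p a && !q a) := by
  induction l with
  | nil => simp
  | cons a t ih =>
    have ht : ∀ b ∈ t, q b = true → p b = true := fun b hb => h b (List.mem_cons_of_mem a hb)
    simp only [List.countP_cons, ih ht]
    by_cases hq : q a = true
    · have := h a (List.mem_cons_self) hq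
      simp [hq, this]; omega
    · simp only [Bool.not_eq_true] at hq
      simp [hq]; omega

theorem pvCov_pos_iff (rw : List (Int × Int × Int)) (v d : Int) :
    0 < pvCov rw v d ↔ ∃ e ∈ rw, e.2.2 = v ∧ e.1 - v ≤ d ∧ d < e.2.1 - v := by
  unfold pvCov
  rw [List.countP_pos_iff]
  constructor
  · rintro ⟨e, he, hp⟩
    simp only [Bool.and_eq_true, beq_iff_eq, decide_eq_true_eq] at hp
    exact ⟨e, he, hp.1, hp.2.1, hp.2.2⟩
  · rintro ⟨e, he, rfl, h1, h2⟩
    exact ⟨e, he, by simp [h1, h2]⟩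

theorem pvBestAux (d : Int) (l : List (Int × Int × Int)) : ∀ (acc : Option Int),
    (l.foldl (fun best e =>
      if e.1 - e.2.2 ≤ d ∧ d < e.2.1 - e.2.2 then
        match best with
        | none => some e.2.2
        | some b => if e.2.2 < b then some e.2.2 else some b
      else best) acc = none ↔ acc = none ∧ ∀ e ∈ l, ¬(e.1 - e.2.2 ≤ d ∧ d < e.2.1 - e.2.2)) ∧
    (∀ m, l.foldl (fun best e =>
      if e.1 - e.2.2 ≤ d ∧ d < e.2.1 - e.2.2 then
        match best with
        | none => some e.2.2
        | some b => if e.2.2 < b then some e.2.2 else some b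
      else best) acc = some m →
      (acc = some m ∨ ∃ e ∈ l, e.2.2 = m ∧ e.1 - e.2.2 ≤ d ∧ d < e.2.1 - e.2.2) ∧
      (∀ b, acc = some b → m ≤ b) ∧
      (∀ e ∈ l, e.1 - e.2.2 ≤ d ∧ d < e.2.1 - e.2.2 → m ≤ e.2.2)) := by
  induction l with
  | nil =>
    intro acc
    constructor
    · simp
    · intro m h; simp at h; subst h; exact ⟨Or.inl rfl, fun b hb => by injection hb with h; omega, by simp⟩
  | cons e t ih =>
    intro acc
    simp only [List.foldl_cons]
    by_cases hc : e.1 - e.2.2 ≤ d ∧ d < e.2.1 - e.2.2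
    · constructor
      · rw [(ih _).1]
        simp only [if_pos hc]
        constructor
        · rintro ⟨h1, -⟩
          exfalso; cases acc <;> simp at h1
          rename_i b; revert h1; split <;> simp
        · rintro ⟨-, h2⟩; exact absurd hc (h2 e (List.mem_cons_self))
      · intro m hm
        obtain ⟨h1, h2, h3⟩ := (ih _).2 m hm
        rw [if_pos hc] at h1 h2
        cases acc with
        | none =>
          rw [show (match (none : Option Int) with | none => some e.2.2 | some b => if e.2.2 < b then some e.2.2 else some b) = some e.2.2 from rfl] at h1 h2
          refine ⟨?_, by simp, ?_⟩
          · rcases h1 with h1 | ⟨e', he', h'⟩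
            · exact Or.inr ⟨e, List.mem_cons_self, Option.some_inj.1 h1, hc⟩
            · exact Or.inr ⟨e', List.mem_cons_of_mem e he', h'⟩
          · intro e' he' hce'
            rcases List.mem_cons.1 he' with rfl | he'
            · exact h2 _ rfl
            · exact h3 e' he' hce'
        | some b0 =>
          rw [show (match (some b0 : Option Int) with | none => some e.2.2 | some b => if e.2.2 < b then some e.2.2 else some b) = if e.2.2 < b0 then some e.2.2 else some b0 from rfl] at h1 h2
          by_cases hb : e.2.2 < b0
          · rw [if_pos hb] at h1 h2
            have hme : m ≤ e.2.2 := h2 _ rfl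
            refine ⟨?_, ?_, ?_⟩
            · rcases h1 with h1 | ⟨e', he', h'⟩
              · exact Or.inr ⟨e, List.mem_cons_self, Option.some_inj.1 h1, hc⟩
              · exact Or.inr ⟨e', List.mem_cons_of_mem e he', h'⟩
            · intro b hb'; injection hb' with hb'; omega
            · intro e' he' hce'
              rcases List.mem_cons.1 he' with rfl | he'
              · exact hme
              · exact h3 e' he' hce'
          · rw [if_neg hb] at h1 h2
            have hmb : m ≤ b0 := h2 _ rfl
            refine ⟨?_, ?_, ?_⟩
            · rcases h1 with h1 | ⟨e', he', h'⟩
              · exact Or.inl h1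
              · exact Or.inr ⟨e', List.mem_cons_of_mem e he', h'⟩
            · intro b hb'; injection hb' with hb'; omega
            · intro e' he' hce'
              rcases List.mem_cons.1 he' with rfl | he'
              · omega
              · exact h3 e' he' hce'
    · rw [if_neg hc]
      constructor
      · rw [(ih acc).1]
        constructor
        · rintro ⟨h1, h2⟩
          exact ⟨h1, fun e' he' => by rcases List.mem_cons.1 he' with rfl | he'; exact hc; exact h2 e' he'⟩
        · rintro ⟨h1, h2⟩
          exact ⟨h1, fun e' he' => h2 e' (List.mem_cons_of_mem e he')⟩
      · intro m hm
        obtain ⟨h1, h2, h3⟩ := (ih acc).2 m hm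
        refine ⟨?_, h2, ?_⟩
        · rcases h1 with h1 | ⟨e', he', h'⟩
          · exact Or.inl h1
          · exact Or.inr ⟨e', List.mem_cons_of_mem e he', h'⟩
        · intro e' he' hce'
          rcases List.mem_cons.1 he' with rfl | he'
          · exact absurd hce' hc
          · exact h3 e' he' hce'

theorem pvBest_none_iff (rw : List (Int × Int × Int)) (d : Int) :
    pvBest rw d = none ↔ ∀ v, pvCov rw v d = 0 := by
  unfold pvBest
  rw [(pvBestAux d rw none).1]
  constructor
  · rintro ⟨-, h⟩ v
    by_contra hv
    obtain ⟨e, he, rfl, h1, h2⟩ := (pvCov_pos_iff rw _ d).1 (Nat.pos_of_ne_zero hv)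
    exact h e he ⟨h1, h2⟩
  · intro h
    refine ⟨rfl, fun e he hce => ?_⟩
    have h1 := (pvCov_pos_iff rw e.2.2 d).2 ⟨e, he, rfl, hce.1, hce.2⟩
    have h2 := h e.2.2
    omega

theorem pvBest_some (rw : List (Int × Int × Int)) (d : Int) (m : Int) (h : pvBest rw d = some m) :
    0 < pvCov rw m d ∧ ∀ v, 0 < pvCov rw v d → m ≤ v := by
  obtain ⟨h1, -, h3⟩ := (pvBestAux d rw none).2 m h
  constructor
  · rcases h1 with h1 | ⟨e, he, rfl, hce⟩
    · simp at h1
    · exact (pvCov_pos_iff rw e.2.2 d).2 ⟨e, he, rfl, hce.1, hce.2⟩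
  · intro v hv
    obtain ⟨e, he, rfl, hc1, hc2⟩ := (pvCov_pos_iff rw v d).1 hv
    exact h3 e he ⟨hc1, hc2⟩

theorem pvMemRaw (rw : List (Int × Int × Int)) (sts : List Int) (e : Int × Int × Int)
    (h : e ∈ pvRawEvents rw sts) :
    (∃ r ∈ rw, e = (r.1 - r.2.2, -1, r.2.2)) ∨ (∃ r ∈ rw, e = (r.2.1 - r.2.2, 0, r.2.2)) ∨
    (∃ p ∈ PySem.List.enumerate sts, e = (p.2, 1, p.1)) := by
  unfold pvRawEvents at h
  rcases List.mem_append.1 h with h | h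
  · obtain ⟨r, hr, he⟩ := List.mem_flatMap.1 h
    simp only [List.mem_cons, List.not_mem_nil, or_false] at he
    rcases he with rfl | rfl
    · exact Or.inl ⟨r, hr, rfl⟩
    · exact Or.inr (Or.inl ⟨r, hr, rfl⟩)
  · obtain ⟨p, hp, he⟩ := List.mem_map.1 h
    exact Or.inr (Or.inr ⟨p, hp, he.symm⟩)

theorem pvCleanup_spec (pu po : PySem.Dict Int Int) : ∀ (q : List Int),
    q.Pairwise (· ≤ ·) → (-1 : Int) ∉ q →
    (∀ v ∈ q, 0 ≤ pu.getD v 0 - po.getD v 0) →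
    (∀ v, pu.getD v 0 - po.getD v 0 ≤ (q.count v : Int)) →
    (pvCleanup pu po q).1.Sublist q ∧
    (∀ v, pu.getD v 0 - po.getD v 0 ≤ ((pvCleanup pu po q).1.count v : Int)) ∧
    (((pvCleanup pu po q).2 = -1 ∧ ∀ v ∈ q, pu.getD v 0 - po.getD v 0 = 0) ∨
      ((pvCleanup pu po q).2 ∈ q ∧ 0 < pu.getD (pvCleanup pu po q).2 0 - po.getD (pvCleanup pu po q).2 0 ∧
        ∀ v ∈ q, 0 < pu.getD v 0 - po.getD v 0 → (pvCleanup pu po q).2 ≤ v)) := by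
  intro q
  induction q with
  | nil =>
    intro _ _ hpos hlb
    refine ⟨List.Sublist.refl _, ?_, Or.inl ⟨rfl, by simp⟩⟩
    intro v; have := hlb v; simpa [pvCleanup] using this
  | cons h t ih =>
    intro hs hne hpos hlb
    have hh : h ≠ -1 := fun hh => hne (hh ▸ List.mem_cons_self)
    rw [List.pairwise_cons] at hs
    simp only [pvCleanup, if_neg hh]
    by_cases h0 : pu.getD h 0 - po.getD h 0 = 0
    · rw [if_pos h0]
      have hlb' : ∀ v, pu.getD v 0 - po.getD v 0 ≤ (t.count v : Int) := by
        intro v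
        by_cases hv : v = h
        · subst hv; omega
        · have := hlb v; rwa [List.count_cons, if_neg (by simpa using Ne.symm hv)] at this
      obtain ⟨s1, s2, s3⟩ := ih hs.2 (fun hm => hne (List.mem_cons_of_mem _ hm)) (fun v hv => hpos v (List.mem_cons_of_mem _ hv)) hlb'
      refine ⟨s1.cons _, s2, ?_⟩
      rcases s3 with ⟨e1, e2⟩ | ⟨e1, e2, e3⟩
      · refine Or.inl ⟨e1, fun v hv => ?_⟩
        rcases List.mem_cons.1 hv with rfl | hv
        · exact h0
        · exact e2 v hv
      · refine Or.inr ⟨List.mem_cons_of_mem _ e1, e2, fun v hv hv0 => ?_⟩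
        rcases List.mem_cons.1 hv with rfl | hv
        · omega
        · exact e3 v hv hv0
    · rw [if_neg h0]
      refine ⟨List.Sublist.refl _, hlb, Or.inr ⟨List.mem_cons_self, ?_, ?_⟩⟩
      · show 0 < pu.getD h 0 - po.getD h 0
        have := hpos h List.mem_cons_self; omega
      · intro v hv _
        rcases List.mem_cons.1 hv with rfl | hv
        · exact le_refl _
        · exact hs.1 v hv

theorem pvKeyLt_iff (a typ x d i : Int) (h : typ < 1) :
    pvEvKey (a, typ, x) < pvEvKey (d, 1, i) ↔ a ≤ d := by
  unfold pvEvKey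
  rw [Prod.Lex.lt_iff]
  constructor
  · rintro (h1 | ⟨h1, -⟩)
    · exact le_of_lt h1
    · exact le_of_eq h1
  · intro h1
    rcases lt_or_eq_of_le h1 with h1 | h1
    · exact Or.inl h1
    · exact Or.inr ⟨h1, by rw [Prod.Lex.lt_iff]; exact Or.inl h⟩

theorem pvEvKey_inj (e f : Int × Int × Int) (h : pvEvKey e = pvEvKey f) : e = f := by
  unfold pvEvKey at h
  have h1 := congrArg (fun z => (ofLex z).1) h
  have h2 := congrArg (fun z => (ofLex ((ofLex z).2)).1) h
  have h3 := congrArg (fun z => (ofLex ((ofLex z).2)).2) h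
  simp at h1 h2 h3
  exact Prod.ext h1 (Prod.ext h2 h3)

theorem pvSum_ite {α : Type} (l : List α) (p : α → Bool) (f : α → Nat)
    (h : ∀ a ∈ l, f a = if p a then 1 else 0) : (l.map f).sum = l.countP p := by
  induction l with
  | nil => simp
  | cons a t ih =>
    simp only [List.map_cons, List.sum_cons, List.countP_cons,
      ih (fun b hb => h b (List.mem_cons_of_mem a hb)), h a List.mem_cons_self]
    omega

theorem pvNet_eq (rw : List (Int × Int × Int)) (sts : List Int)
    (hres : ∀ r ∈ rw, r.2.1 < r.1 → ∀ r' ∈ rw, r'.2.2 = r.2.2 → r' = r)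
    (E P rest : List (Int × Int × Int)) (d i : Int)
    (hperm : E.Perm (pvRawEvents rw sts))
    (hsort : E.Pairwise (fun a b => pvEvKey a ≤ pvEvKey b))
    (hE : E = P ++ (d, 1, i) :: rest) :
    ∀ v, pvNet P v ≤ (pvCov rw v d : Int) ∧
      (0 < pvCov rw v d → pvNet P v = (pvCov rw v d : Int)) ∧
      (pvNet P v < 0 → pvCntS P v = 0) := by
  intro v
  subst hE
  rw [List.pairwise_append] at hsort
  -- keys of P-elements are < the person key; keys in the tail are ≥ it
  have hPlt : ∀ a ∈ P, a.2.1 ≠ 1 → pvEvKey a < pvEvKey (d, 1, i) := by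
    intro a ha htyp
    have hle := hsort.2.2 a ha (d, 1, i) List.mem_cons_self
    rcases lt_or_eq_of_le hle with hlt | heq
    · exact hlt
    · exact absurd (congrArg (fun e => e.2.1) (pvEvKey_inj _ _ heq)) htyp
  have hRge : ∀ a ∈ (d, 1, i) :: rest, ¬(pvEvKey a < pvEvKey (d, 1, i)) := by
    intro a ha
    rcases List.mem_cons.1 ha with rfl | ha
    · exact lt_irrefl _
    · exact not_lt.2 ((List.pairwise_cons.1 hsort.2.1).1 a ha)
  -- prefix counts = threshold counts over the whole event list
  have key : ∀ (ty : Int), ty ≠ 1 →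
      (P.countP (fun e => e.2.1 == ty && e.2.2 == v)
        = (P ++ (d, 1, i) :: rest).countP
            (fun e => (e.2.1 == ty && e.2.2 == v) && decide (pvEvKey e < pvEvKey (d, 1, i)))) := by
    intro ty hty
    rw [List.countP_append]
    have h1 : P.countP (fun e => (e.2.1 == ty && e.2.2 == v) && decide (pvEvKey e < pvEvKey (d, 1, i)))
        = P.countP (fun e => e.2.1 == ty && e.2.2 == v) := by
      apply List.countP_congr
      intro a ha
      simp only [Bool.and_eq_true, beq_iff_eq, decide_eq_true_eq]
      constructor
      · rintro ⟨h1, -⟩; exact h1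
      · rintro ⟨h1, h2⟩
        exact ⟨⟨h1, h2⟩, hPlt a ha (by rw [h1]; exact hty)⟩
    have h2 : ((d, 1, i) :: rest).countP
        (fun e => (e.2.1 == ty && e.2.2 == v) && decide (pvEvKey e < pvEvKey (d, 1, i))) = 0 := by
      rw [List.countP_eq_zero]
      intro a ha
      simp only [Bool.and_eq_true, beq_iff_eq, decide_eq_true_eq, not_and]
      intro _ h
      exact absurd h (hRge a ha)
    omega
  -- threshold counts over raw events, computed per roadwork
  have hraw : ∀ (ty : Int), ty ≠ 1 →
      (P ++ (d, 1, i) :: rest).countP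
          (fun e => (e.2.1 == ty && e.2.2 == v) && decide (pvEvKey e < pvEvKey (d, 1, i)))
        = (pvRawEvents rw sts).countP
            (fun e => (e.2.1 == ty && e.2.2 == v) && decide (pvEvKey e < pvEvKey (d, 1, i))) :=
    fun ty _ => hperm.countP_eq _
  have hS : pvCntS P v = rw.countP (fun r => r.2.2 == v && decide (r.1 - v ≤ d)) := by
    rw [pvCntS, key (-1) (by omega), hraw (-1) (by omega), pvRawEvents, List.countP_append]
    have hp : ((PySem.List.enumerate sts).map (fun p => (p.2, (1 : Int), p.1))).countP
        (fun e => (e.2.1 == (-1 : Int) && e.2.2 == v) && decide (pvEvKey e < pvEvKey (d, 1, i))) = 0 := by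
      rw [List.countP_eq_zero]
      intro a ha
      obtain ⟨p, -, rfl⟩ := List.mem_map.1 ha
      simp
    rw [hp, List.countP_flatMap, Nat.add_zero]
    apply pvSum_ite
    intro r _
    simp only [Function.comp_apply, List.countP_cons, List.countP_nil]
    by_cases hv : r.2.2 = v
    · subst hv
      by_cases hd : r.1 - r.2.2 ≤ d
      · simp [pvKeyLt_iff _ _ _ _ _ (by omega : (-1:Int) < 1), hd]
      · simp [pvKeyLt_iff _ _ _ _ _ (by omega : (-1:Int) < 1), hd]
    · simp [hv]
  have hEc : pvCntE P v = rw.countP (fun r => r.2.2 == v && decide (r.2.1 - v ≤ d)) := by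
    rw [pvCntE, key 0 (by omega), hraw 0 (by omega), pvRawEvents, List.countP_append]
    have hp : ((PySem.List.enumerate sts).map (fun p => (p.2, (1 : Int), p.1))).countP
        (fun e => (e.2.1 == (0 : Int) && e.2.2 == v) && decide (pvEvKey e < pvEvKey (d, 1, i))) = 0 := by
      rw [List.countP_eq_zero]
      intro a ha
      obtain ⟨p, -, rfl⟩ := List.mem_map.1 ha
      simp
    rw [hp, List.countP_flatMap, Nat.add_zero]
    apply pvSum_ite
    intro r _
    simp only [Function.comp_apply, List.countP_cons, List.countP_nil]
    by_cases hv : r.2.2 = v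
    · subst hv
      by_cases hd : r.2.1 - r.2.2 ≤ d
      · simp [pvKeyLt_iff _ _ _ _ _ (by omega : (0:Int) < 1), hd]
      · simp [pvKeyLt_iff _ _ _ _ _ (by omega : (0:Int) < 1), hd]
    · simp [hv]
  by_cases hrev : ∃ r, r ∈ rw ∧ r.2.2 = v ∧ r.2.1 < r.1
  · -- some reversed roadwork carries value v: by Pre_, every value-v roadwork equals it
    obtain ⟨r0, hr0, hr0v, hr0rev⟩ := hrev
    have hall : ∀ a ∈ rw, a.2.2 = v → a = r0 := by
      intro a ha hav
      exact hres r0 hr0 hr0rev a ha (by rw [hav, hr0v])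
    have hA : rw.countP (fun r => r.2.2 == v && decide (r.1 - v ≤ d))
        = (if r0.1 - v ≤ d then rw.countP (fun r => r.2.2 == v) else 0) := by
      by_cases hc : r0.1 - v ≤ d
      · rw [if_pos hc]
        apply List.countP_congr
        intro a ha
        by_cases hav : a.2.2 = v
        · rw [hall a ha hav]; simp [hr0v, hc]
        · simp [hav]
      · rw [if_neg hc, List.countP_eq_zero]
        intro a ha h
        simp only [Bool.and_eq_true, beq_iff_eq, decide_eq_true_eq] at h
        rw [hall a ha h.1] at h
        exact hc h.2
    have hB : rw.countP (fun r => r.2.2 == v && decide (r.2.1 - v ≤ d))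
        = (if r0.2.1 - v ≤ d then rw.countP (fun r => r.2.2 == v) else 0) := by
      by_cases hc : r0.2.1 - v ≤ d
      · rw [if_pos hc]
        apply List.countP_congr
        intro a ha
        by_cases hav : a.2.2 = v
        · rw [hall a ha hav]; simp [hr0v, hc]
        · simp [hav]
      · rw [if_neg hc, List.countP_eq_zero]
        intro a ha h
        simp only [Bool.and_eq_true, beq_iff_eq, decide_eq_true_eq] at h
        rw [hall a ha h.1] at h
        exact hc h.2
    have hcov0 : pvCov rw v d = 0 := by
      rw [pvCov, List.countP_eq_zero]
      intro a ha h
      simp only [Bool.and_eq_true, beq_iff_eq, decide_eq_true_eq] at h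
      rw [hall a ha h.1] at h
      omega
    unfold pvNet
    rw [hS, hEc, hA, hB, hcov0]
    by_cases hc1 : r0.1 - v ≤ d <;> by_cases hc2 : r0.2.1 - v ≤ d <;>
      simp [hc1, hc2] <;> omega
  · -- every roadwork with value v satisfies s ≤ t
    push_neg at hrev
    have hsplit := pvCountP_split rw
        (fun r => r.2.2 == v && decide (r.1 - v ≤ d))
        (fun r => r.2.2 == v && decide (r.2.1 - v ≤ d))
        (by
          intro a ha h
          simp only [Bool.and_eq_true, beq_iff_eq, decide_eq_true_eq] at h ⊢
          have := hrev a ha h.1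
          exact ⟨h.1, by omega⟩)
    simp only [] at hsplit
    have hnot : ∀ (y : Int), (!decide (y ≤ d)) = decide (d < y) := by
      intro y; by_cases h : y ≤ d <;> simp [h] <;> omega
    have hcov : rw.countP (fun r => r.2.2 == v && decide (r.1 - v ≤ d) && !(r.2.2 == v && decide (r.2.1 - v ≤ d)))
        = pvCov rw v d := by
      apply List.countP_congr
      intro a _
      by_cases hav : a.2.2 = v
      · by_cases h1 : a.1 - v ≤ d <;> by_cases h2 : a.2.1 - v ≤ d <;>
          simp [pvCov, hav, h1, h2] <;> omega
      · simp [pvCov, hav]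
    unfold pvNet
    rw [hS, hEc]
    refine ⟨by omega, fun _ => by omega, fun h => by omega⟩

theorem pvCntS_append (P : List (Int × Int × Int)) (a b c v : Int) :
    pvCntS (P ++ [(a, b, c)]) v = pvCntS P v + (if b = -1 ∧ c = v then 1 else 0) := by
  simp only [pvCntS, List.countP_append, List.countP_cons, List.countP_nil]
  by_cases h1 : b = (-1 : Int) <;> by_cases h2 : c = v <;> simp [h1, h2]

theorem pvCntE_append (P : List (Int × Int × Int)) (a b c v : Int) :
    pvCntE (P ++ [(a, b, c)]) v = pvCntE P v + (if b = 0 ∧ c = v then 1 else 0) := by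
  simp only [pvCntE, List.countP_append, List.countP_cons, List.countP_nil]
  by_cases h1 : b = (0 : Int) <;> by_cases h2 : c = v <;> simp [h1, h2]

theorem pvLoopA_eq (rw : List (Int × Int × Int)) (sts : List Int)
    (hneg : ∀ e ∈ rw, e.2.2 ≠ -1)
    (hres : ∀ r ∈ rw, r.2.1 < r.1 → ∀ r' ∈ rw, r'.2.2 = r.2.2 → r' = r)
    (E : List (Int × Int × Int))
    (hperm : E.Perm (pvRawEvents rw sts))
    (hsort : E.Pairwise (fun a b => pvEvKey a ≤ pvEvKey b)) :
    ∀ (rest P : List (Int × Int × Int)) (q : List Int) (pu po : PySem.Dict Int Int) (ans : List Int),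
      E = P ++ rest → pvInv P q pu po →
      pvLoopA rest q pu po ans = rest.foldl (pvUpd rw) ans := by
  intro rest
  induction rest with
  | nil => intro P q pu po ans _ _; rfl
  | cons e rest ih =>
    intro P q pu po ans hE hinv
    obtain ⟨hpu, hpo, hq, hlow, hhigh⟩ := hinv
    have heE : e ∈ E := hE ▸ List.mem_append.2 (Or.inr List.mem_cons_self)
    have heraw := pvMemRaw rw sts e (hperm.mem_iff.1 heE)
    have hE' : E = (P ++ [e]) ++ rest := by rw [hE, List.append_assoc]; rfl
    obtain ⟨t0, typ, x⟩ := e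
    rcases heraw with ⟨r, hr, hre⟩ | ⟨r, hr, hre⟩ | ⟨p, hp, hre⟩
    · -- start event
      have h1 : typ = -1 := congrArg (fun z => z.2.1) hre
      subst h1
      simp only [pvLoopA, if_pos rfl, List.foldl_cons]
      have hupd : pvUpd rw ans (t0, -1, x) = ans := by
        unfold pvUpd; rw [if_neg (by norm_num)]
      rw [hupd]
      apply ih (P ++ [(t0, -1, x)]) _ _ _ _ hE'
      refine ⟨?_, ?_, pvPairwise_heapPush q x hq, ?_, ?_⟩
      · intro v
        rw [PySem.Dict.getD_insert, pvCntS_append]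
        by_cases hv : v = x
        · rw [if_pos hv, if_pos ⟨rfl, hv.symm⟩, hpu x, hv]; push_cast; ring
        · rw [if_neg hv, if_neg (fun h => hv h.2.symm), hpu v]; push_cast; ring
      · intro v
        rw [pvCntE_append, if_neg (show ¬((-1:Int) = 0 ∧ x = v) from fun h => absurd h.1 (by norm_num)), hpo v]
        push_cast; ring
      · intro v
        have hl := hlow v
        rw [pvCount_heapPush]
        unfold pvNet at hl ⊢
        rw [pvCntS_append, pvCntE_append,
          if_neg (show ¬((-1:Int) = 0 ∧ x = v) from fun h => absurd h.1 (by norm_num))]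
        by_cases hv : v = x
        · rw [if_pos hv, if_pos ⟨rfl, hv.symm⟩]; push_cast at hl ⊢; omega
        · rw [if_neg hv, if_neg (fun h => hv h.2.symm)]; push_cast at hl ⊢; omega
      · intro v
        have hh := hhigh v
        rw [pvCount_heapPush, pvCntS_append]
        by_cases hv : v = x
        · rw [if_pos hv, if_pos ⟨rfl, hv.symm⟩]; push_cast at hh ⊢; omega
        · rw [if_neg hv, if_neg (fun h => hv h.2.symm)]; push_cast at hh ⊢; omega
    · -- end event
      have h1 : typ = 0 := congrArg (fun z => z.2.1) hre
      subst h1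
      simp only [pvLoopA, if_neg (show ¬(0:Int) = -1 from by norm_num), if_pos rfl, List.foldl_cons]
      have hupd : pvUpd rw ans (t0, 0, x) = ans := by
        unfold pvUpd; rw [if_neg (by norm_num)]
      rw [hupd]
      apply ih (P ++ [(t0, 0, x)]) _ _ _ _ hE'
      refine ⟨?_, ?_, hq, ?_, ?_⟩
      · intro v
        rw [pvCntS_append, if_neg (show ¬((0:Int) = -1 ∧ x = v) from fun h => absurd h.1 (by norm_num)), hpu v]
        push_cast; ring
      · intro v
        rw [PySem.Dict.getD_insert, pvCntE_append]
        by_cases hv : v = x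
        · rw [if_pos hv, if_pos ⟨rfl, hv.symm⟩, hpo x, hv]; push_cast; ring
        · rw [if_neg hv, if_neg (fun h => hv h.2.symm), hpo v]; push_cast; ring
      · intro v
        have hl := hlow v
        unfold pvNet at hl ⊢
        rw [pvCntS_append, pvCntE_append,
          if_neg (show ¬((0:Int) = -1 ∧ x = v) from fun h => absurd h.1 (by norm_num))]
        by_cases hv : v = x
        · rw [if_pos ⟨rfl, hv.symm⟩]; push_cast at hl ⊢; omega
        · rw [if_neg (fun h => hv h.2.symm)]; push_cast at hl ⊢; omega
      · intro v
        have hh := hhigh v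
        rw [pvCntS_append, if_neg (show ¬((0:Int) = -1 ∧ x = v) from fun h => absurd h.1 (by norm_num))]
        push_cast at hh ⊢; omega
    · -- person event
      have h1 : t0 = p.2 := congrArg (fun z => z.1) hre
      have h2 : typ = 1 := congrArg (fun z => z.2.1) hre
      have h3 : x = p.1 := congrArg (fun z => z.2.2) hre
      subst h1; subst h2; subst h3
      simp only [pvLoopA, if_neg (show ¬(1:Int) = -1 from by norm_num),
        if_neg (show ¬(1:Int) = 0 from by norm_num), List.foldl_cons]
      have hnet := pvNet_eq rw sts hres E P rest p.2 p.1 hperm hsort hE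
      have hgd : ∀ v, pu.getD v 0 - po.getD v 0 = pvNet P v := by
        intro v; rw [hpu v, hpo v]; rfl
      have hpos : ∀ v ∈ q, 0 ≤ pu.getD v 0 - po.getD v 0 := by
        intro v hv
        rw [hgd v]
        by_contra hneg2
        have h6 := (hnet v).2.2 (by omega)
        have h7 := List.count_pos_iff.2 hv
        have h8 := hhigh v
        omega
      have hne : (-1 : Int) ∉ q := by
        intro hm
        have hc : 0 < q.count (-1) := List.count_pos_iff.2 hm
        have h2 := hhigh (-1)
        have h3 : 0 < pvCntS P (-1) := by omega
        obtain ⟨a, haP, hpa⟩ := List.countP_pos_iff.1 h3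
        simp only [Bool.and_eq_true, beq_iff_eq] at hpa
        have haE : a ∈ E := hE ▸ List.mem_append.2 (Or.inl haP)
        rcases pvMemRaw rw sts a (hperm.mem_iff.1 haE) with ⟨r', hr', ha⟩ | ⟨r', hr', ha⟩ | ⟨p', hp', ha⟩ <;>
          rw [ha] at hpa <;> simp at hpa
        exact hneg r' hr' hpa
      have hlb : ∀ v, pu.getD v 0 - po.getD v 0 ≤ (q.count v : Int) := by
        intro v; rw [hgd v]; exact hlow v
      obtain ⟨s1, s2, s3⟩ := pvCleanup_spec pu po q hq hne hpos hlb
      have hval : (pvCleanup pu po q).2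
          = (match pvBest rw p.2 with | none => -1 | some b => b) := by
        cases hbest : pvBest rw p.2 with
        | none =>
          have hcov := (pvBest_none_iff rw p.2).1 hbest
          rcases s3 with ⟨hv, -⟩ | ⟨-, hv, -⟩
          · exact hv
          · exfalso
            rw [hgd _] at hv
            have h6 := (hnet (pvCleanup pu po q).2).1
            rw [hcov ((pvCleanup pu po q).2)] at h6
            omega
        | some m =>
          have hbs := pvBest_some rw p.2 m hbest
          have hnm : 0 < pu.getD m 0 - po.getD m 0 := by
            rw [hgd m, (hnet m).2.1 hbs.1]; exact_mod_cast hbs.1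
          have hmq : m ∈ q := by
            apply List.count_pos_iff.1
            have := hlb m
            omega
          rcases s3 with ⟨-, hv⟩ | ⟨hmem2, hpos2, hmin2⟩
          · have := hv m hmq; omega
          · have hc1 : m ≤ (pvCleanup pu po q).2 := by
              apply hbs.2
              have h5 := hpos2
              rw [hgd ((pvCleanup pu po q).2)] at h5
              have h6 := (hnet (pvCleanup pu po q).2).1
              omega
            have hc2 : (pvCleanup pu po q).2 ≤ m := hmin2 m hmq hnm
            show (pvCleanup pu po q).2 = m
            omega
      rw [hval]
      have hupd : pvUpd rw ans (p.2, 1, p.1)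
          = PySem.List.pySetD ans p.1 (match pvBest rw p.2 with | none => -1 | some b => b) := by
        unfold pvUpd; rw [if_pos rfl]
      rw [← hupd]
      apply ih (P ++ [(p.2, 1, p.1)]) _ _ _ _ hE'
      refine ⟨?_, ?_, List.Pairwise.sublist s1 hq, ?_, ?_⟩
      · intro v
        rw [pvCntS_append, if_neg (show ¬((1:Int) = -1 ∧ p.1 = v) from fun h => absurd h.1 (by norm_num)), hpu v]
        push_cast; ring
      · intro v
        rw [pvCntE_append, if_neg (show ¬((1:Int) = 0 ∧ p.1 = v) from fun h => absurd h.1 (by norm_num)), hpo v]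
        push_cast; ring
      · intro v
        unfold pvNet
        rw [pvCntS_append, if_neg (show ¬((1:Int) = -1 ∧ p.1 = v) from fun h => absurd h.1 (by norm_num)),
          pvCntE_append, if_neg (show ¬((1:Int) = 0 ∧ p.1 = v) from fun h => absurd h.1 (by norm_num))]
        have := s2 v
        rw [hgd v] at this
        unfold pvNet at this
        push_cast at this ⊢
        omega
      · intro v
        rw [pvCntS_append, if_neg (show ¬((1:Int) = -1 ∧ p.1 = v) from fun h => absurd h.1 (by norm_num))]
        have h1 := s1.count_le v
        have h2 := hhigh v
        push_cast at h2 ⊢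
        omega

theorem pvEnum_shape (sts : List Int) (p : Int × Int) (hp : p ∈ PySem.List.enumerate sts) :
    ∃ (k : Nat) (hk : k < sts.length), p = ((k : Int), sts[k]'hk) := by
  rw [PySem.List.enumerate_eq_zipIdx_map] at hp
  obtain ⟨q, hq, hpe⟩ := List.mem_map.1 hp
  obtain ⟨-, h2, h3⟩ := List.mem_zipIdx (show (q.1, q.2) ∈ sts.zipIdx 0 from by simpa using hq)
  refine ⟨q.2, by omega, ?_⟩
  rw [← hpe]
  simp only [Nat.sub_zero] at h3
  simp [h3]

theorem pvFilterRaw (rw : List (Int × Int × Int)) (sts : List Int) :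
    (pvRawEvents rw sts).filter (fun e => decide (e.2.1 = 1))
      = (PySem.List.enumerate sts).map (fun p => (p.2, (1 : Int), p.1)) := by
  unfold pvRawEvents
  rw [List.filter_append]
  have h1 : (rw.flatMap (fun e => [(e.1 - e.2.2, (-1 : Int), e.2.2), (e.2.1 - e.2.2, 0, e.2.2)])).filter
      (fun e => decide (e.2.1 = 1)) = [] := by
    rw [List.filter_eq_nil_iff]
    intro a ha
    obtain ⟨r, -, hre⟩ := List.mem_flatMap.1 ha
    simp only [List.mem_cons, List.not_mem_nil, or_false] at hre
    rcases hre with rfl | rfl <;> simp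
  have h2 : ((PySem.List.enumerate sts).map (fun p => (p.2, (1 : Int), p.1))).filter
      (fun e => decide (e.2.1 = 1)) = (PySem.List.enumerate sts).map (fun p => (p.2, (1 : Int), p.1)) := by
    rw [List.filter_eq_self]
    intro a ha
    obtain ⟨p, -, rfl⟩ := List.mem_map.1 ha
    simp
  rw [h1, h2, List.nil_append]

theorem pvSet_comm (z : List Int) (x y : Int × Int × Int) (vx vy : Int)
    (hx : 0 ≤ x.2.2) (hy : 0 ≤ y.2.2) (hne : x.2.2 ≠ y.2.2) :
    PySem.List.pySetD (PySem.List.pySetD z x.2.2 vx) y.2.2 vy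
      = PySem.List.pySetD (PySem.List.pySetD z y.2.2 vy) x.2.2 vx := by
  rw [PySem.List.pySetD_of_nonneg _ _ hx, PySem.List.pySetD_of_nonneg _ _ hy,
    PySem.List.pySetD_of_nonneg _ _ hy, PySem.List.pySetD_of_nonneg _ _ hx]
  exact List.set_comm _ _ (fun h => hne (by omega))

theorem pvInv_nil : pvInv [] [] PySem.Dict.empty PySem.Dict.empty := by
  refine ⟨?_, ?_, List.Pairwise.nil, ?_, ?_⟩ <;>
    intro v <;> simp [PySem.Dict.getD_empty, pvCntS, pvCntE, pvNet]

-- ===== VERDICT (by name: the statement is the Claim_ definition above) =====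
theorem calculate_walking_distances_spec : Claim_equal_calculate_walking_distances := by
  unfold Claim_equal_calculate_walking_distances
  intro N Q rw sts _hdom hpre
  obtain ⟨hpre1, hres, -⟩ := hpre
  unfold Spec_calculate_walking_distances
  unfold calculate_walking_distances calculate_walking_distances_alt
  dsimp only
  rw [PySem.List.foldl_append_singleton_eq_map, PySem.List.foldl_append_eq_flatMap, List.nil_append]
  have hragg : (rw.flatMap fun e => [(e.1 - e.2.2, (-1 : Int), e.2.2), (e.2.1 - e.2.2, 0, e.2.2)])
      ++ (PySem.List.enumerate sts).map (fun p => (p.2, (1 : Int), p.1)) = pvRawEvents rw sts := rfl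
  rw [hragg]
  set raw := pvRawEvents rw sts with hraw
  set E := PySem.List.sorted raw pvEvKey with hEdef
  set ans0 : List Int := List.replicate Q.toNat (-1) with hans0
  have hperm : E.Perm raw := PySem.List.sorted_perm raw pvEvKey false
  have hsort : E.Pairwise (fun a b => pvEvKey a ≤ pvEvKey b) := PySem.List.sorted_pairwise raw pvEvKey
  have h1 : pvLoopA E [] PySem.Dict.empty PySem.Dict.empty ans0 = E.foldl (pvUpd rw) ans0 :=
    pvLoopA_eq rw sts hpre1 hres E hperm hsort E [] [] PySem.Dict.empty PySem.Dict.empty ans0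
      (by simp) pvInv_nil
  have h2 : E.foldl (pvUpd rw) ans0
      = (E.filter (fun e => decide (e.2.1 = 1))).foldl
          (fun a e => PySem.List.pySetD a e.2.2 (match pvBest rw e.1 with | none => -1 | some b => b)) ans0 := by
    rw [← PySem.List.foldl_ite_eq_foldl_filter (fun e => e.2.1 = 1)
      (fun a e => PySem.List.pySetD a e.2.2 (match pvBest rw e.1 with | none => -1 | some b => b)) E ans0]
    rfl
  have hpermP : (E.filter (fun e => decide (e.2.1 = 1))).Perm
      ((PySem.List.enumerate sts).map (fun p => (p.2, (1 : Int), p.1))) := by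
    have := hperm.filter (fun e => decide (e.2.1 = 1))
    rwa [pvFilterRaw rw sts] at this
  have h3 : (E.filter (fun e => decide (e.2.1 = 1))).foldl
        (fun a e => PySem.List.pySetD a e.2.2 (match pvBest rw e.1 with | none => -1 | some b => b)) ans0
      = ((PySem.List.enumerate sts).map (fun p => (p.2, (1 : Int), p.1))).foldl
        (fun a e => PySem.List.pySetD a e.2.2 (match pvBest rw e.1 with | none => -1 | some b => b)) ans0 := by
    apply List.Perm.foldl_eq' hpermP
    intro x hx y hy z
    obtain ⟨px, hpx, hxe⟩ := List.mem_map.1 (hpermP.mem_iff.1 hx)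
    obtain ⟨py, hpy, hye⟩ := List.mem_map.1 (hpermP.mem_iff.1 hy)
    obtain ⟨kx, hkx, rfl⟩ := pvEnum_shape sts px hpx
    obtain ⟨ky, hky, rfl⟩ := pvEnum_shape sts py hpy
    subst hxe; subst hye
    by_cases hk : kx = ky
    · subst hk; rfl
    · exact pvSet_comm z _ _ _ _ (by positivity) (by positivity)
        (fun h => hk (by simpa using h))
  rw [h1, h2, h3, List.foldl_map]
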